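-- pv_equiv track=rewrite | github.com/BaronVonYolo/DefensiePuzzeltjes | 2022/opgave1.py | indigo
-- ===== SOURCE A (Python) =====
-- alph = 'abcdefghijklmnopqrstuvwxyz'
--
-- def indigo(str, start=0, l=0):
--     if start > 0 or l > 0:
--         partial = str[start:start+l]
--         opl = indigo(partial)
--         ret = str[0:start] + opl + str[start+l:]
--         return ret
--
--     opl=''
--
--     key = 'indigo'
--     i = 0
--     for letter in str:
--         if letter in alph:
--             num = alph.find(letter)
--             numk = alph.find(key[i])
--
--             opl += alph[(num-numk+len(alph))%len(alph)]
--             key += alph[(num-numk+len(alph))%len(alph)]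
--
--             i+=1
--         else:
--             opl += letter
--
--     return opl
-- ===== SOURCE B (Python) =====
-- alph = 'abcdefghijklmnopqrstuvwxyz'
--
-- def indigo(str, start=0, l=0):
--     if start > 0 or l > 0:
--         partial = str[start:start+l]
--         opl = indigo(partial)
--         ret = str[0:start] + opl + str[start+l:]
--         return ret
--
--     # phase 1: collect the alphabetic characters
--     letters = [c for c in str if c in alph]
--     # phase 2: decode them as a pure autokey stream ('indigo' followed by the output)
--     dec = []
--     for c in letters:
--         j = len(dec)
--         k = 'indigo'[j] if j < 6 else dec[j - 6]
--         dec.append(alph[(alph.find(c) - alph.find(k) + len(alph)) % len(alph)])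
--     # phase 3: scatter the decoded letters back among the non-letters
--     it = iter(dec)
--     return ''.join(next(it) if c in alph else c for c in str)
-- ===== Notes on version B (the rewrite author's own statement) =====
-- stated objective: alternative
-- what changed: A decodes in one interleaved loop carrying the growing key string and a key index; B splits the work into three phases: collect the alphabetic characters, decode them as a pure autokey stream (key[j] is 'indigo'[j] for j<6, else the (j-6)-th decoded letter, so no key string is maintained), then scatter the decoded letters back among the non-letters.
import Mathlib
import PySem

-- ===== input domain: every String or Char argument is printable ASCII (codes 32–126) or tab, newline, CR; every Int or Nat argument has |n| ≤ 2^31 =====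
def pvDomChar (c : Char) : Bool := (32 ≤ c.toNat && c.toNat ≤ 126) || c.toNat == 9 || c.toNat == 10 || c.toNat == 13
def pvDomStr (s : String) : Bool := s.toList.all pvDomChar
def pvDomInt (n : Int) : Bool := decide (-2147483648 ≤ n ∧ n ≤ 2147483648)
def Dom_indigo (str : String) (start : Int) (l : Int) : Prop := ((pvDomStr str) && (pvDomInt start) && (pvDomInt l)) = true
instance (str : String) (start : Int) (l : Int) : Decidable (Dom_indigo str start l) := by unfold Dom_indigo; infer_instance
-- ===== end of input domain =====

-- B replaces A's single interleaved loop (growing key string + key index) by three phases: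
-- collect the letters, decode them as a pure autokey stream, scatter them back (objective: alternative).

-- module constant alph
def alphL : List Char := "abcdefghijklmnopqrstuvwxyz".toList
-- the string literal 'indigo'
def indigoL : List Char := "indigo".toList

-- ===== PORT A =====
-- one iteration of A's loop over the string, carrying (opl, key, i)
def stepA (acc : List Char × List Char × Int) (letter : Char) : List Char × List Char × Int :=
  let opl := acc.1
  let key := acc.2.1
  let i := acc.2.2
  if PySem.Chars.isIn [letter] alphL then
    let num := PySem.Chars.find alphL [letter]
    let numk := PySem.Chars.find alphL [PySem.List.pyGetD key i ' ']  -- key[i]: always in range (i = #letters decoded = len key - 6)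
    let d := PySem.List.pyGetD alphL (PySem.Int.mod (num - numk + (alphL.length : Int)) (alphL.length : Int)) ' '
    (opl ++ [d], key ++ [d], i + 1)
  else (opl ++ [letter], key, i)

-- the 'start == 0 and l == 0' main branch of A
def indigoBaseA (s : List Char) : List Char :=
  (s.foldl stepA ([], indigoL, (0 : Int))).1

def indigo (str : String) (start : Int) (l : Int) : String :=
  if start > 0 ∨ l > 0 then
    let s := str.toList
    let part := PySem.List.slice s (some start) (some (start + l))
    let opl := indigoBaseA part          -- indigo(partial) recurses with start=0, l=0, i.e. the main branch
    String.ofList (PySem.List.slice s (some 0) (some start) ++ opl ++ PySem.List.slice s (some (start + l)) none)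
  else
    String.ofList (indigoBaseA str.toList)

-- ===== PORT B =====
-- decode one letter given the letters already decoded: key[j] is 'indigo'[j] for j < 6, else dec[j-6]
def decStep (c : Char) (dec : List Char) : Char :=
  let j := dec.length
  let k := if j < 6 then indigoL.getD j ' ' else dec.getD (j - 6) ' '  -- both indexings always in range
  PySem.List.pyGetD alphL
    (PySem.Int.mod (PySem.Chars.find alphL [c] - PySem.Chars.find alphL [k] + (alphL.length : Int)) (alphL.length : Int)) ' '

-- phase 2: decode the collected letters left to right
def decLoop (letters : List Char) (dec : List Char) : List Char :=
  match letters with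
  | [] => dec
  | c :: rest => decLoop rest (dec ++ [decStep c dec])

-- phase 3: scatter — emit the next decoded letter at each alphabetic position, copy the rest
def scat (s : List Char) (dec : List Char) : List Char :=
  match s with
  | [] => []
  | c :: rest =>
    if PySem.Chars.isIn [c] alphL then dec.headD ' ' :: scat rest dec.tail  -- next(it): the stream never runs dry
    else c :: scat rest dec

def indigoBaseB (s : List Char) : List Char :=
  let letters := s.filter (fun c => PySem.Chars.isIn [c] alphL)
  let dec := decLoop letters []
  scat s dec

def indigo_alt (str : String) (start : Int) (l : Int) : String :=
  if start > 0 ∨ l > 0 then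
    let s := str.toList
    let part := PySem.List.slice s (some start) (some (start + l))
    let opl := indigoBaseB part
    String.ofList (PySem.List.slice s (some 0) (some start) ++ opl ++ PySem.List.slice s (some (start + l)) none)
  else
    String.ofList (indigoBaseB str.toList)

-- ===== PRECONDITION & SPEC =====
def Spec_indigo (str : String) (start : Int) (l : Int) (out : String) : Prop := out = indigo_alt str start l
instance (str : String) (start : Int) (l : Int) (out : String) : Decidable (Spec_indigo str start l out) := by unfold Spec_indigo; infer_instance

-- ===== CLAIM (what is proved, stated in full; the proofs are below) =====
def Claim_equal_indigo : Prop := ∀ (str : String) (start : Int) (l : Int), Dom_indigo str start l → Spec_indigo str start l (indigo str start l)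

-- ===== LEMMAS AND PROOFS =====

-- fused reference form: decode per character, carrying only the decoded letters
def fuse (s : List Char) (dec : List Char) : List Char :=
  match s with
  | [] => []
  | c :: rest =>
    if PySem.Chars.isIn [c] alphL then decStep c dec :: fuse rest (dec ++ [decStep c dec])
    else c :: fuse rest dec

-- A's key[i] at state key = indigoL ++ dec, i = dec.length, is B's key lookup
lemma keyAt (dec : List Char) :
    PySem.List.pyGetD (indigoL ++ dec) ((dec.length : Int)) ' '
      = (if dec.length < 6 then indigoL.getD dec.length ' ' else dec.getD (dec.length - 6) ' ') := by
  rw [PySem.List.pyGetD_natCast]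
  have h6 : indigoL.length = 6 := by decide
  by_cases h : dec.length < 6
  · rw [List.getD, List.getElem?_append_left (by omega), if_pos h, List.getD]
  · rw [List.getD, List.getElem?_append_right (by omega), if_neg h, List.getD, h6]

-- A's loop from the invariant state computes the fused form
lemma foldA_fuse (s : List Char) : ∀ (opl dec : List Char),
    (s.foldl stepA (opl, indigoL ++ dec, (dec.length : Int))).1 = opl ++ fuse s dec := by
  induction s with
  | nil => intro opl dec; simp [fuse]
  | cons c rest ih =>
    intro opl dec
    by_cases h : PySem.Chars.isIn [c] alphL
    · have hd : stepA (opl, indigoL ++ dec, (dec.length : Int)) c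
          = (opl ++ [decStep c dec], indigoL ++ (dec ++ [decStep c dec]),
             (((dec ++ [decStep c dec]).length : Int))) := by
        simp only [stepA, h, if_pos, keyAt, decStep]
        refine Prod.ext rfl (Prod.ext (by simp) ?_)
        simp
      rw [List.foldl_cons, hd, ih]
      simp [fuse, h]
    · have hd : stepA (opl, indigoL ++ dec, (dec.length : Int)) c
          = (opl ++ [c], indigoL ++ dec, (dec.length : Int)) := by
        simp only [stepA, h, if_neg, Bool.false_eq_true, not_false_iff]
      rw [List.foldl_cons, hd, ih]
      simp [fuse, h]

lemma indigoBaseA_fuse (s : List Char) : indigoBaseA s = fuse s [] := by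
  have := foldA_fuse s [] []
  simpa [indigoBaseA] using this

-- decLoop only appends to its accumulator
lemma decLoop_prefix (L : List Char) : ∀ dec, ∃ t, decLoop L dec = dec ++ t := by
  induction L with
  | nil => intro dec; exact ⟨[], by simp [decLoop]⟩
  | cons c rest ih =>
    intro dec
    obtain ⟨t, ht⟩ := ih (dec ++ [decStep c dec])
    exact ⟨decStep c dec :: t, by simp [decLoop, ht]⟩

-- B's scatter over the decoded stream computes the fused form
lemma scat_decLoop (s : List Char) : ∀ dec : List Char,
    scat s ((decLoop (s.filter (fun c => PySem.Chars.isIn [c] alphL)) dec).drop dec.length)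
      = fuse s dec := by
  induction s with
  | nil => intro dec; simp [scat, fuse]
  | cons c rest ih =>
    intro dec
    by_cases h : PySem.Chars.isIn [c] alphL
    · obtain ⟨t, ht⟩ := decLoop_prefix (rest.filter (fun c => PySem.Chars.isIn [c] alphL))
        (dec ++ [decStep c dec])
      have hdl : decLoop ((c :: rest).filter (fun c => PySem.Chars.isIn [c] alphL)) dec
          = decLoop (rest.filter (fun c => PySem.Chars.isIn [c] alphL)) (dec ++ [decStep c dec]) := by
        simp [h, decLoop]
      have hdrop : (decLoop (rest.filter (fun c => PySem.Chars.isIn [c] alphL))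
            (dec ++ [decStep c dec])).drop dec.length = decStep c dec :: t := by
        rw [ht, List.append_assoc, List.drop_left]; rfl
      have hdrop' : (decLoop (rest.filter (fun c => PySem.Chars.isIn [c] alphL))
            (dec ++ [decStep c dec])).drop (dec ++ [decStep c dec]).length = t := by
        rw [ht, List.drop_left]
      rw [hdl, hdrop]
      show scat (c :: rest) (decStep c dec :: t) = fuse (c :: rest) dec
      rw [scat, fuse, if_pos h, if_pos h]
      simp only [List.headD, List.tail]
      rw [← hdrop', ih]
    · have hdl : decLoop ((c :: rest).filter (fun c => PySem.Chars.isIn [c] alphL)) dec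
          = decLoop (rest.filter (fun c => PySem.Chars.isIn [c] alphL)) dec := by
        simp [h]
      rw [hdl, scat, fuse, if_neg h, if_neg h, ih]

lemma indigoBaseB_fuse (s : List Char) : indigoBaseB s = fuse s [] := by
  have := scat_decLoop s []
  simpa [indigoBaseB] using this

lemma base_eq (s : List Char) : indigoBaseA s = indigoBaseB s := by
  rw [indigoBaseA_fuse, indigoBaseB_fuse]

-- ===== VERDICT (by name: the statement is the Claim_ definition above) =====
theorem indigo_spec : Claim_equal_indigo := by
  intro str start l _
  show indigo str start l = indigo_alt str start l
  unfold indigo indigo_alt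
  by_cases h : start > 0 ∨ l > 0
  · simp only [if_pos h, base_eq]
  · simp only [if_neg h, base_eq]
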